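-- pv_equiv track=rewrite | github.com/blunkx/110-Information-Security | HW1/hw1-decryption.py | vernam
-- ===== SOURCE A (Python) =====
-- def vernam(key: str, ciphertext: str) -> str:
--     key = key.upper()
--     ciphertext = ciphertext.upper()
--     upper = "ABCDEFGHIJKLMNOPQRSTUVWXYZ"
--     plaintext = []
--     for i, j in zip(ciphertext, range(len(ciphertext))):
--         plaintext.append(upper[(upper.index(i) ^ upper.index(key[j])) % 26])
--         key += plaintext[-1]
--     plaintext = "".join(plaintext)
--     return plaintext
-- ===== SOURCE B (Python) =====
-- def vernam(key: str, ciphertext: str) -> str: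
--     key = key.upper()
--     ciphertext = ciphertext.upper()
--     upper = "ABCDEFGHIJKLMNOPQRSTUVWXYZ"
--     L = len(key)
--     n = len(ciphertext)
--     plaintext = []
--     for j in range(min(L, n)):
--         plaintext.append(upper[(upper.index(ciphertext[j]) ^ upper.index(key[j])) % 26])
--     for j in range(L, n):
--         plaintext.append(upper[(upper.index(ciphertext[j]) ^ upper.index(plaintext[j - L])) % 26])
--     return "".join(plaintext)
-- ===== Notes on version B (the rewrite author's own statement) =====
-- stated objective: simpler
-- what changed: B drops A's growing key string (key += plaintext[-1] each step) and instead runs two plain index loops: the first min(len(key),n) positions use the key directly, the rest read the keystream straight from the already-produced plaintext at j-len(key).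
import Mathlib
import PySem

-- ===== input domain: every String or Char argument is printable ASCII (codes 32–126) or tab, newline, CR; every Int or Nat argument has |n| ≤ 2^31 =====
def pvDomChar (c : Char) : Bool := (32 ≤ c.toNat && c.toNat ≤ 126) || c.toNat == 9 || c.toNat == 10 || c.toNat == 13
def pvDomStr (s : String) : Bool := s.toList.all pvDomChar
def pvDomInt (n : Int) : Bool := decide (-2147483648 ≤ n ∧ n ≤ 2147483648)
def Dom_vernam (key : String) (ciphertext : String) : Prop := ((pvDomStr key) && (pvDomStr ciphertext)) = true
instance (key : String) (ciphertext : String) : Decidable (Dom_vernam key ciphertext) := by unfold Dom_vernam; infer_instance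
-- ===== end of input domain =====

-- B replaces A's growing key string by two plain index loops (keystream head from the key,
-- tail read directly from the produced plaintext): simpler decomposition, same result.

-- ===== PORT A =====

/-- the alphabet `upper = "ABCDEFGHIJKLMNOPQRSTUVWXYZ"` -/
def pvUpper : List Char := "ABCDEFGHIJKLMNOPQRSTUVWXYZ".toList

/-- `upper[(upper.index(i) ^ upper.index(k)) % 26]` — shared verbatim by both Pythons.
    `index?.getD 0` / `getD 'A'`: Python raises there (excluded by `Pre_vernam`). -/
def pvEnc (i k : Char) : Char :=
  pvUpper.getD ((((PySem.List.index? pvUpper i).getD 0) ^^^ ((PySem.List.index? pvUpper k).getD 0)) % 26) 'A'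

/-- A's loop: `for i, j in zip(ciphertext, range(len(ciphertext)))`, appending to both
    the plaintext and the key.  `key[j]` is `pyGet?` (default unreachable under `Pre_`). -/
def vernamGoA : List Char → Nat → List Char → List Char → List Char
  | [], _, _, acc => acc
  | i :: rest, j, key, acc =>
    let c := pvEnc i ((PySem.List.pyGet? key ((j : Nat) : Int)).getD 'A')
    vernamGoA rest (j + 1) (key ++ [c]) (acc ++ [c])

def vernam (key : String) (ciphertext : String) : String :=
  String.ofList (vernamGoA (PySem.Chars.upper ciphertext.toList) 0 (PySem.Chars.upper key.toList) [])

-- ===== PORT B =====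

def vernam_alt (key : String) (ciphertext : String) : String :=
  let keyL := PySem.Chars.upper key.toList
  let ct := PySem.Chars.upper ciphertext.toList
  let L := keyL.length
  let n := ct.length
  -- for j in range(min(L, n)): plaintext.append(enc(ciphertext[j], key[j]))
  let pt1 := (PySem.List.pyRange 0 (((min L n : Nat)) : Int) 1).foldl
    (fun pt j => pt ++ [pvEnc ((PySem.List.pyGet? ct j).getD 'A') ((PySem.List.pyGet? keyL j).getD 'A')]) []
  -- for j in range(L, n): plaintext.append(enc(ciphertext[j], plaintext[j - L]))
  let pt2 := (PySem.List.pyRange ((L : Nat) : Int) ((n : Nat) : Int) 1).foldl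
    (fun pt j => pt ++ [pvEnc ((PySem.List.pyGet? ct j).getD 'A') ((PySem.List.pyGet? pt (j - ((L : Nat) : Int))).getD 'A')]) pt1
  String.ofList pt2

-- ===== PRECONDITION & SPEC =====
-- Pre_ excludes exactly the inputs where Python A raises: a non-letter among the characters
-- it looks up in `upper` (ValueError from upper.index), or an empty key with a nonempty
-- ciphertext (IndexError on key[0]).
def Pre_vernam (key : String) (ciphertext : String) : Prop :=
  (ciphertext.toList.all (fun c => PySem.Chars.isalpha c) = true) ∧
  ((key.toList.take ciphertext.toList.length).all (fun c => PySem.Chars.isalpha c) = true) ∧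
  (ciphertext.toList = [] ∨ key.toList ≠ [])
instance (key : String) (ciphertext : String) : Decidable (Pre_vernam key ciphertext) := by
  unfold Pre_vernam; infer_instance

def pvWitness_vernam : String × String := ("KEY", "HELLOWORLD")

def Spec_vernam (key : String) (ciphertext : String) (out : String) : Prop := out = vernam_alt key ciphertext
instance (key : String) (ciphertext : String) (out : String) : Decidable (Spec_vernam key ciphertext out) := by unfold Spec_vernam; infer_instance

-- ===== CLAIM (what is proved, stated in full; the proofs are below) =====
def Claim_equal_vernam : Prop := ∀ (key : String) (ciphertext : String), Dom_vernam key ciphertext → Pre_vernam key ciphertext → Spec_vernam key ciphertext (vernam key ciphertext)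

-- ===== LEMMAS AND PROOFS =====

/-- reference recursion: keystream char for position `j` read from the fixed key head
    or from the plaintext accumulated so far. -/
def pvRef (key0 : List Char) : List Char → Nat → List Char → List Char
  | [], _, acc => acc
  | i :: rest, j, acc =>
    pvRef key0 rest (j + 1)
      (acc ++ [pvEnc i (if j < key0.length then key0.getD j 'A' else acc.getD (j - key0.length) 'A')])

theorem pvRef_length (key0 : List Char) (xs : List Char) :
    ∀ j acc, (pvRef key0 xs j acc).length = acc.length + xs.length := by
  induction xs with
  | nil => intro j acc; simp [pvRef]
  | cons i rest ih =>
      intro j acc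
      simp [pvRef, ih]
      omega

theorem pvRef_append (key0 : List Char) (xs ys : List Char) :
    ∀ j acc, pvRef key0 (xs ++ ys) j acc = pvRef key0 ys (j + xs.length) (pvRef key0 xs j acc) := by
  induction xs with
  | nil => intro j acc; simp [pvRef]
  | cons i rest ih =>
      intro j acc
      simp only [List.cons_append, pvRef, ih, List.length_cons]
      ring_nf

/-- A's loop, with the growing key split into the fixed head and the accumulator, is `pvRef`. -/
theorem vernamGoA_eq_pvRef (key0 : List Char) (xs : List Char) :
    ∀ j acc, acc.length = j → vernamGoA xs j (key0 ++ acc) acc = pvRef key0 xs j acc := by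
  induction xs with
  | nil => intro j acc _; rfl
  | cons i rest ih =>
      intro j acc hlen
      have hget : (PySem.List.pyGet? (key0 ++ acc) ((j : Nat) : Int)).getD 'A'
          = (if j < key0.length then key0.getD j 'A' else acc.getD (j - key0.length) 'A') := by
        rw [PySem.List.pyGet?_natCast, List.getElem?_append]
        by_cases h : j < key0.length
        · simp [h, List.getD]
        · simp [h, List.getD]
      simp only [vernamGoA, pvRef, hget]
      rw [List.append_assoc]
      exact ih (j + 1) (acc ++ [_]) (by simp [hlen])

/-- B's first loop (over `range(min L n)`) is `pvRef` on the corresponding slice of `ct`. -/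
theorem foldB1_eq_pvRef (key0 ct : List Char) (m : Nat) (hmL : m ≤ key0.length) (hmn : m ≤ ct.length) :
    ∀ (a : Nat), a ≤ m → ∀ acc,
      (PySem.List.pyRange ((a : Nat) : Int) ((m : Nat) : Int) 1).foldl
        (fun pt j => pt ++ [pvEnc ((PySem.List.pyGet? ct j).getD 'A') ((PySem.List.pyGet? key0 j).getD 'A')]) acc
      = pvRef key0 ((ct.take m).drop a) a acc := by
  intro a ha
  induction h : m - a generalizing a with
  | zero =>
      intro acc
      have hma : m = a := by omega
      subst hma
      rw [PySem.List.pyRange_one_eq_nil (by omega)]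
      simp [pvRef]
  | succ k ih =>
      intro acc
      have ham : a < m := by omega
      rw [PySem.List.pyRange_one_cons (by exact_mod_cast ham)]
      have han : a < ct.length := by omega
      have haL : a < key0.length := by omega
      have hct : (PySem.List.pyGet? ct ((a : Nat) : Int)).getD 'A' = ct[a] := by
        rw [PySem.List.pyGet?_natCast]
        simp [List.getElem?_eq_getElem han]
      have hk : (PySem.List.pyGet? key0 ((a : Nat) : Int)).getD 'A' = key0.getD a 'A' := by
        rw [PySem.List.pyGet?_natCast]
        simp [List.getD]
      have hdrop : (ct.take m).drop a = ct[a] :: (ct.take m).drop (a + 1) := by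
        rw [List.drop_eq_getElem_cons (by simp [han]; omega)]
        simp [List.getElem_take]
      simp only [List.foldl_cons, hct, hk, hdrop, pvRef, haL, if_pos]
      rw [show ((a : Nat) : Int) + 1 = (((a + 1 : Nat)) : Int) by push_cast; ring]
      exact ih (a + 1) (by omega) (by omega) _

/-- B's second loop (over `range(L, n)`) is `pvRef` on the tail of `ct`. -/
theorem foldB2_eq_pvRef (key0 ct : List Char) :
    ∀ (a : Nat), key0.length ≤ a → ∀ acc, acc.length = a →
      (PySem.List.pyRange ((a : Nat) : Int) ((ct.length : Nat) : Int) 1).foldl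
        (fun pt j => pt ++ [pvEnc ((PySem.List.pyGet? ct j).getD 'A')
          ((PySem.List.pyGet? pt (j - ((key0.length : Nat) : Int))).getD 'A')]) acc
      = pvRef key0 (ct.drop a) a acc := by
  intro a hLa
  induction h : ct.length - a generalizing a with
  | zero =>
      intro acc _
      rw [PySem.List.pyRange_one_eq_nil (by omega), List.drop_eq_nil_of_le (by omega)]
      rfl
  | succ k ih =>
      intro acc hacc
      have han : a < ct.length := by omega
      rw [PySem.List.pyRange_one_cons (by exact_mod_cast han)]
      have hct : (PySem.List.pyGet? ct ((a : Nat) : Int)).getD 'A' = ct[a] := by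
        rw [PySem.List.pyGet?_natCast]
        simp [List.getElem?_eq_getElem han]
      have hacc' : (PySem.List.pyGet? acc (((a : Nat) : Int) - ((key0.length : Nat) : Int))).getD 'A'
          = acc.getD (a - key0.length) 'A' := by
        rw [show (((a : Nat) : Int) - ((key0.length : Nat) : Int)) = (((a - key0.length : Nat)) : Int) by omega,
          PySem.List.pyGet?_natCast]
        simp [List.getD]
      have hdrop : ct.drop a = ct[a] :: ct.drop (a + 1) := List.drop_eq_getElem_cons han
      have hnot : ¬ a < key0.length := by omega
      simp only [List.foldl_cons, hct, hacc', hdrop, pvRef, hnot, if_neg, not_false_iff]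
      rw [show ((a : Nat) : Int) + 1 = (((a + 1 : Nat)) : Int) by push_cast; ring]
      exact ih (a + 1) (by omega) (by omega) _ (by simp [hacc])

/-- the two ports agree on every input (the Python-raising cases excluded by `Pre_` default the
    same way in both ports, so the Lean-level equality is unconditional). -/
theorem vernam_eq_alt (key ciphertext : String) : vernam key ciphertext = vernam_alt key ciphertext := by
  simp only [vernam, vernam_alt]
  set key0 := PySem.Chars.upper key.toList with hkey0
  set ct := PySem.Chars.upper ciphertext.toList with hct
  set L := key0.length with hL
  set n := ct.length with hn
  have hA : vernamGoA ct 0 key0 [] = pvRef key0 ct 0 [] := by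
    have := vernamGoA_eq_pvRef key0 ct 0 [] rfl
    simpa using this
  rw [hA]
  have h1 := foldB1_eq_pvRef key0 ct (min L n) (Nat.min_le_left _ _) (Nat.min_le_right _ _) 0
    (Nat.zero_le _) []
  simp only [Nat.cast_zero, List.drop_zero] at h1
  rw [h1]
  by_cases hLn : L ≤ n
  · have hm : min L n = L := by omega
    rw [hm]
    have hlen : (pvRef key0 (ct.take L) 0 []).length = L := by
      rw [pvRef_length]; simp; omega
    rw [foldB2_eq_pvRef key0 ct L le_rfl _ hlen]
    conv_lhs => rw [show ct = ct.take L ++ ct.drop L from (List.take_append_drop L ct).symm]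
    rw [pvRef_append]
    have : 0 + (ct.take L).length = L := by simp; omega
    rw [this]
  · have hm : min L n = n := by omega
    rw [hm]
    rw [PySem.List.pyRange_one_eq_nil (by exact_mod_cast (by omega : n ≤ L))]
    simp only [List.foldl_nil]
    congr 1
    simp [hn]

-- ===== VERDICT (by name: the statement is the Claim_ definition above) =====
theorem vernam_spec : Claim_equal_vernam := by
  intro key ciphertext _ _
  unfold Spec_vernam
  exact vernam_eq_alt key ciphertext
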